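-- pv_equiv track=rewrite | github.com/jagwithyou/python-placement-series | Basics/create_histogram.py | reverse_histogram
-- ===== SOURCE A (Python) =====
-- def reverse_histogram(input_list):
--     max_val = max(input_list)
--     res = ""
--     while max_val >0:
--         for value in input_list:
--             if max_val <= value:
--                 res = res + " * "
--             else:
--                 res += "   "
--         res += "\n"
--         max_val -= 1
--
--     res = res + ("-"*len(input_list)*3) +"\n"
--     for data in input_list:
--         res=res+" "+str(data)+" "
--     return res
-- ===== SOURCE B (Python) =====
-- def reverse_histogram(input_list):
--     max_val = max(input_list)
--     levels = range(max_val, 0, -1)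
--     columns = [[" * " if lvl <= v else "   " for lvl in levels] for v in input_list]
--     body = "".join("".join(row) + "\n" for row in zip(*columns))
--     sep = "-" * (3 * len(input_list)) + "\n"
--     axis = "".join(" " + str(d) + " " for d in input_list)
--     return body + sep + axis
-- ===== Notes on version B (the rewrite author's own statement) =====
-- stated objective: faster
-- what changed: B builds the histogram column-major: one column of cells per input value over the level list range(max,0,-1), transposed with zip(*columns) and assembled with str.join, replacing A's row-major while-loop that grows one string by repeated += (quadratic re-copying).
-- outside the precondition, e.g. on reverse_histogram([]): A raises ValueError, B raises ValueError
import Mathlib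
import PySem

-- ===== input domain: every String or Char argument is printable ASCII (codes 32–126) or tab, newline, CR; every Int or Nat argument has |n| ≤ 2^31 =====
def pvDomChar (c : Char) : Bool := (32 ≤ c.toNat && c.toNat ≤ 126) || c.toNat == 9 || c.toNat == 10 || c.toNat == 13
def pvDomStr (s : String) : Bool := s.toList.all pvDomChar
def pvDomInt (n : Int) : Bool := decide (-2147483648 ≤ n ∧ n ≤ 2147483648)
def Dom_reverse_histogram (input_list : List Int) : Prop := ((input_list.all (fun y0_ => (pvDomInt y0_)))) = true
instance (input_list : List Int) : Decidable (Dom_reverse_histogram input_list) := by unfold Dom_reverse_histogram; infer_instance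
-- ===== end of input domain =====

-- B builds the same text column-major (columns zipped into rows, joined once) instead of A's row-major while-loop += accumulator; measured faster in a timing run.

-- ===== PORT A =====
-- the while-loop of A: res accumulates one row per level max_val, max_val-1, …, 1
def pvARows (input_list : List Int) (max_val : Int) (res : String) : String :=
  if max_val > 0 then
    pvARows input_list (max_val - 1)
      ((input_list.foldl (fun r value => r ++ (if max_val ≤ value then " * " else "   ")) res) ++ "\n")
  else res
termination_by max_val.toNat
decreasing_by omega

def reverse_histogram (input_list : List Int) : String :=
  match PySem.List.max? input_list (fun y => y) with
  | none => ""   -- Python: max([]) raises ValueError; excluded by Pre_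
  | some max_val =>
    let res := pvARows input_list max_val ""
    let res := res ++ String.mk (List.replicate (input_list.length * 3) '-') ++ "\n"
    input_list.foldl (fun r data => r ++ " " ++ PySem.Int.toStr data ++ " ") res

-- ===== PORT B =====
-- Python's zip(*cols): rows of heads while every column is nonempty
def pvZipN (cols : List (List String)) : List (List String) :=
  match cols with
  | [] => []
  | c :: rest =>
    match hh : (c :: rest).mapM List.head? with
    | some heads => heads :: pvZipN ((c :: rest).map List.tail)
    | none => []
termination_by (cols.headD []).length
decreasing_by
  simp only [List.mapM_cons, Option.bind_eq_bind, Option.bind_eq_some_iff, Option.pure_def,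
    Option.some.injEq] at hh
  obtain ⟨h0, hh0, _⟩ := hh
  have hc : c ≠ [] := by intro h; subst h; simp at hh0
  cases c with
  | nil => exact absurd rfl hc
  | cons a t => simp

def reverse_histogram_alt (input_list : List Int) : String :=
  match PySem.List.max? input_list (fun y => y) with
  | none => ""   -- Python: max([]) raises ValueError; excluded by Pre_
  | some max_val =>
    let levels := PySem.List.pyRange max_val 0 (-1)
    let columns := input_list.map (fun v => levels.map (fun lvl => if lvl ≤ v then " * " else "   "))
    let body := String.join ((pvZipN columns).map (fun row => String.join row ++ "\n"))
    let sep := String.mk (List.replicate (3 * input_list.length) '-') ++ "\n"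
    let axis := String.join (input_list.map (fun d => " " ++ PySem.Int.toStr d ++ " "))
    body ++ sep ++ axis

-- ===== PRECONDITION & SPEC =====
-- Pre_ excludes only the empty list, on which Python's max([]) raises ValueError
def Pre_reverse_histogram (input_list : List Int) : Prop := input_list ≠ []
instance (input_list : List Int) : Decidable (Pre_reverse_histogram input_list) := by unfold Pre_reverse_histogram; infer_instance
def pvWitness_reverse_histogram : List Int := ([2, 1, 3])
def Spec_reverse_histogram (input_list : List Int) (out : String) : Prop := out = reverse_histogram_alt input_list
instance (input_list : List Int) (out : String) : Decidable (Spec_reverse_histogram input_list out) := by unfold Spec_reverse_histogram; infer_instance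

-- ===== CLAIM (what is proved, stated in full; the proofs are below) =====
def Claim_equal_reverse_histogram : Prop := ∀ (input_list : List Int), Dom_reverse_histogram input_list → Pre_reverse_histogram input_list → Spec_reverse_histogram input_list (reverse_histogram input_list)

-- ===== LEMMAS AND PROOFS =====

-- foldl of append over strings peels off its initial accumulator
theorem pv_join_foldl : ∀ (L : List String) (s : String),
    L.foldl (fun r t => r ++ t) s = s ++ L.foldl (fun r t => r ++ t) "" := by
  intro L
  induction L with
  | nil => intro s; simp
  | cons a t ih =>
    intro s
    simp only [List.foldl]
    rw [ih, ih ("" ++ a)]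
    simp [String.append_assoc]

theorem pv_join_cons (a : String) (L : List String) :
    String.join (a :: L) = a ++ String.join L := by
  simp only [String.join, List.foldl]
  rw [pv_join_foldl]
  simp

-- folding `r ++ f v` over a list is the join of the map
theorem pv_foldl_str (f : Int → String) : ∀ (xs : List Int) (res : String),
    xs.foldl (fun r v => r ++ f v) res = res ++ String.join (xs.map f) := by
  intro xs
  induction xs with
  | nil => intro res; simp [String.join]
  | cons x t ih =>
    intro res
    simp only [List.foldl, List.map_cons, ih, pv_join_cons]
    simp [String.append_assoc]

-- every column starts with its head: mapM head? collects the heads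
theorem pv_mapM_head (g : Int → String) (G : Int → List String) :
    ∀ (xs : List Int), (xs.map (fun v => g v :: G v)).mapM List.head? = some (xs.map g) := by
  intro xs
  induction xs with
  | nil => simp
  | cons a t ih => simp [List.mapM_cons, ih]

-- the zip-of-columns is the row list, for a nonempty list of values
theorem pv_zipN_map (g : Int → Int → String) : ∀ (L : List Int) (xs : List Int), xs ≠ [] →
    pvZipN (xs.map (fun v => L.map (fun l => g l v))) = L.map (fun l => xs.map (fun v => g l v)) := by
  intro L
  induction L with
  | nil =>
    intro xs hxs
    cases xs with
    | nil => exact absurd rfl hxs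
    | cons a t =>
      simp only [List.map_cons, List.map_nil]
      unfold pvZipN
      split
      · rename_i heads heq
        simp at heq
      · rfl
  | cons l L' ih =>
    intro xs hxs
    cases xs with
    | nil => exact absurd rfl hxs
    | cons a t =>
      unfold pvZipN
      have hheads := pv_mapM_head (fun v => g l v) (fun v => L'.map (fun l' => g l' v)) (a :: t)
      simp only [List.map_cons] at hheads ⊢
      rw [hheads]
      split
      · rename_i heads heq
        have hh2 : heads = g l a :: t.map (fun v => g l v) := by
          injection heq with h; exact h.symm
        subst hh2
        have htails : (g l a :: List.map (fun l' => g l' a) L').tail ::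
            (t.map (fun v => g l v :: L'.map (fun l' => g l' v))).map List.tail
            = (a :: t).map (fun v => L'.map (fun l' => g l' v)) := by
          simp [List.map_map]
        rw [htails, ih (a :: t) (by simp)]
        simp
      · rename_i heq
        exact absurd heq (Option.some_ne_none _)

-- A's while-loop in closed row-list form
theorem pv_aRows_eq_aux (xs : List Int) : ∀ (n : Nat) (m : Int), m.toNat = n → ∀ (res : String),
    pvARows xs m res = res ++ String.join ((PySem.List.pyRange m 0 (-1)).map
      (fun l => String.join (xs.map (fun v => if l ≤ v then " * " else "   ")) ++ "\n")) := by
  intro n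
  induction n with
  | zero =>
    intro m hm res
    have hm0 : ¬ m > 0 := by omega
    rw [pvARows, if_neg hm0, PySem.List.pyRange_neg_one_eq_nil (by omega)]
    simp [String.join]
  | succ n ih =>
    intro m hm res
    have hm0 : m > 0 := by omega
    rw [pvARows, if_pos hm0, ih (m - 1) (by omega),
      PySem.List.pyRange_neg_one_cons (by omega : (0:Int) < m)]
    rw [pv_foldl_str, List.map_cons, pv_join_cons]
    simp [String.append_assoc]

theorem pv_aRows_eq (xs : List Int) (m : Int) (res : String) :
    pvARows xs m res = res ++ String.join ((PySem.List.pyRange m 0 (-1)).map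
      (fun l => String.join (xs.map (fun v => if l ≤ v then " * " else "   ")) ++ "\n")) :=
  pv_aRows_eq_aux xs m.toNat m rfl res

theorem reverse_histogram_spec : Claim_equal_reverse_histogram := by
  unfold Claim_equal_reverse_histogram
  intro xs _ hpre
  unfold Spec_reverse_histogram reverse_histogram reverse_histogram_alt
  cases hmax : PySem.List.max? xs (fun y => y) with
  | none => rfl
  | some m =>
    simp only []
    rw [pv_aRows_eq, pv_zipN_map (fun l v => if l ≤ v then " * " else "   ") _ xs hpre]
    simp only [String.append_assoc, List.map_map, Function.comp_def]
    rw [pv_foldl_str (fun d => " " ++ (PySem.Int.toStr d ++ " "))]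
    simp [String.append_assoc, Nat.mul_comm]
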